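-- pv_equiv track=rewrite | github.com/itfat/Template_Matching | evolutionary_algorithm.py | sortedPopTable
-- ===== SOURCE A (Python) =====
-- def sortedPopTable(sorted_fitness, fitness_values, pop_size, pop_table):
--     sorted_pop_table = []
--
--     for i in range(pop_size):
--         for j in range(pop_size):
--             if (sorted_fitness[i]==fitness_values[j]):
--                 fitness_values[j] = -100
--                 sorted_pop_table.append(pop_table[j])
--
--     return sorted_pop_table
-- ===== SOURCE B (Python) =====
-- def sortedPopTable(sorted_fitness, fitness_values, pop_size, pop_table):
--     buckets = {}
--     for j in range(pop_size):
--         buckets.setdefault(fitness_values[j], []).append(j)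
--
--     out = []
--     for i in range(pop_size):
--         for j in buckets.pop(sorted_fitness[i], []):
--             out.append(pop_table[j])
--     return out
-- ===== Notes on version B (the rewrite author's own statement) =====
-- stated objective: faster
-- what changed: Replaces A's nested O(n^2) rescan with a one-pass index (dict fitness value -> list of indices) built once, each sorted value popping its whole bucket in O(1); Pre_ excludes inputs where pop_size exceeds a list length (A raises IndexError, or its in-range behaviour on a short pop_table is accidental) and inputs where A's in-band deletion sentinel -100 occurs as a query in sorted_fitness, where A's matches depend on leftover masking state.
-- outside the precondition, e.g. on sortedPopTable([5], [7], 1, []): A returns [], B returns []; on sortedPopTable([5, -100], [5, 1], 2, [10, 20]): A returns [10, 10], B returns [10]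
import Mathlib
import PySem

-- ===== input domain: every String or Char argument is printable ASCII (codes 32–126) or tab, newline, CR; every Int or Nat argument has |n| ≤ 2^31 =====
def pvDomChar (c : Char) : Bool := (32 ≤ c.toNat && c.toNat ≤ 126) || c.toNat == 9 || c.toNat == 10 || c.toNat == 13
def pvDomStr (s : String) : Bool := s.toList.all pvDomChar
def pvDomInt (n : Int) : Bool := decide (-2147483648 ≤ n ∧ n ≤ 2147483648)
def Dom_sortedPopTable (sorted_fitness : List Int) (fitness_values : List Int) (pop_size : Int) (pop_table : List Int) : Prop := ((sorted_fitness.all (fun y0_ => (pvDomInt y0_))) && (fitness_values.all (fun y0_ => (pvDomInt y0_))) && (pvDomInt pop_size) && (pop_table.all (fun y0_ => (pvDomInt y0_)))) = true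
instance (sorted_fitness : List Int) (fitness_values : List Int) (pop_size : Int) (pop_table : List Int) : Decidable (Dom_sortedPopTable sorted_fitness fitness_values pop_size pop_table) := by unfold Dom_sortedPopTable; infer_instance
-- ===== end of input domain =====

-- B builds a fitness->indices bucket index once and pops a whole bucket per sorted value (objective:
-- faster). A mutates fitness_values in place (matched slots set to -100); B does not; the equivalence
-- proved here is about the return value only.

-- ===== PORT A =====
def sortedPopTable (sorted_fitness : List Int) (fitness_values : List Int) (pop_size : Int) (pop_table : List Int) : List Int :=
  let res := (PySem.List.pyRange 0 pop_size 1).foldl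
    (fun (st : List Int × List Int) i =>
      (PySem.List.pyRange 0 pop_size 1).foldl
        (fun (st2 : List Int × List Int) j =>
          if PySem.List.pyGetD sorted_fitness i 0 = PySem.List.pyGetD st2.1 j 0 then
            (PySem.List.pySetD st2.1 j (-100), st2.2 ++ [PySem.List.pyGetD pop_table j 0])
          else st2) st)
    (fitness_values, ([] : List Int))
  res.2

-- ===== PORT B =====
def sortedPopTable_alt (sorted_fitness : List Int) (fitness_values : List Int) (pop_size : Int) (pop_table : List Int) : List Int :=
  let buckets := (PySem.List.pyRange 0 pop_size 1).foldl
    (fun (bk : PySem.Dict Int (List Int)) j =>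
      bk.modify (PySem.List.pyGetD fitness_values j 0) [] (· ++ [j]))
    PySem.Dict.empty
  let fin := (PySem.List.pyRange 0 pop_size 1).foldl
    (fun (st : PySem.Dict Int (List Int) × List Int) i =>
      let q := PySem.List.pyGetD sorted_fitness i 0
      let js := st.1.getD q []            -- buckets.pop(q, [])
      (st.1.erase q, st.2 ++ js.map (fun j => PySem.List.pyGetD pop_table j 0)))
    (buckets, ([] : List Int))
  fin.2

-- ===== PRECONDITION & SPEC =====
-- A raises IndexError when pop_size exceeds the length of sorted_fitness or fitness_values, or when a
-- matched index falls past the end of pop_table (a uniform in-range bound is stated, so the inputs where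
-- pop_table is shorter than pop_size yet no matched index reaches past it — where A returns — are also
-- excluded). Pre_ also excludes inputs whose first pop_size sorted_fitness entries contain -100, A's
-- in-band deletion sentinel: there A's matches depend on leftover masking state, an accidental corner
-- no caller using -100 as a marker would specify.
def Pre_sortedPopTable (sorted_fitness : List Int) (fitness_values : List Int) (pop_size : Int) (pop_table : List Int) : Prop :=
  pop_size ≤ (sorted_fitness.length : Int) ∧ pop_size ≤ (fitness_values.length : Int) ∧
  pop_size ≤ (pop_table.length : Int) ∧ (-100 : Int) ∉ sorted_fitness.take pop_size.toNat
instance (sorted_fitness : List Int) (fitness_values : List Int) (pop_size : Int) (pop_table : List Int) : Decidable (Pre_sortedPopTable sorted_fitness fitness_values pop_size pop_table) := by unfold Pre_sortedPopTable; infer_instance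
def pvWitness_sortedPopTable : List Int × List Int × Int × List Int := ([3, 1], [1, 3], 2, [10, 20])

def Spec_sortedPopTable (sorted_fitness : List Int) (fitness_values : List Int) (pop_size : Int) (pop_table : List Int) (out : List Int) : Prop := out = sortedPopTable_alt sorted_fitness fitness_values pop_size pop_table
instance (sorted_fitness : List Int) (fitness_values : List Int) (pop_size : Int) (pop_table : List Int) (out : List Int) : Decidable (Spec_sortedPopTable sorted_fitness fitness_values pop_size pop_table out) := by unfold Spec_sortedPopTable; infer_instance

-- ===== CLAIM (what is proved, stated in full; the proofs are below) =====
def Claim_equal_sortedPopTable : Prop := ∀ (sorted_fitness : List Int) (fitness_values : List Int) (pop_size : Int) (pop_table : List Int), Dom_sortedPopTable sorted_fitness fitness_values pop_size pop_table → Pre_sortedPopTable sorted_fitness fitness_values pop_size pop_table → Spec_sortedPopTable sorted_fitness fitness_values pop_size pop_table (sortedPopTable sorted_fitness fitness_values pop_size pop_table)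

-- ===== LEMMAS AND PROOFS =====

-- indices 0 … pop_size-1
def pvIdxs (ps : Int) : List Int := PySem.List.pyRange 0 ps 1

-- indices whose current fitness value is v
def pvMatches (fvc : List Int) (ps v : Int) : List Int :=
  (pvIdxs ps).filter (fun j => decide (PySem.List.pyGetD fvc j 0 = v))

-- A's fitness list after one inner loop with query q, positions a ≤ k < ps masked to -100
def pvMask (q a ps : Int) (fvc : List Int) : List Int :=
  fvc.mapIdx (fun k x => if a ≤ (k : Int) ∧ (k : Int) < ps ∧ x = q then -100 else x)

-- one outer-loop step of A, abstracted over the query value q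
def pvStepA (ps : Int) (pt : List Int) (st : List Int × List Int) (q : Int) : List Int × List Int :=
  (pvIdxs ps).foldl
    (fun (st2 : List Int × List Int) j =>
      if q = PySem.List.pyGetD st2.1 j 0 then
        (PySem.List.pySetD st2.1 j (-100), st2.2 ++ [PySem.List.pyGetD pt j 0])
      else st2) st

-- one phase-2 step of B, abstracted over the query value q
def pvStepB (pt : List Int) (st : PySem.Dict Int (List Int) × List Int) (q : Int) :
    PySem.Dict Int (List Int) × List Int :=
  (st.1.erase q, st.2 ++ (st.1.getD q []).map (fun j => PySem.List.pyGetD pt j 0))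

theorem pv_length_mask (q a ps : Int) (fvc : List Int) : (pvMask q a ps fvc).length = fvc.length := by
  simp [pvMask]

theorem pv_getD_nonneg (xs : List Int) (j : Int) (hj : 0 ≤ j) :
    PySem.List.pyGetD xs j 0 = xs.getD j.toNat 0 := by
  have h2 : j = ((j.toNat : Nat) : Int) := by omega
  rw [h2, PySem.List.pyGetD_natCast]
  have h3 : ((j.toNat : Nat) : Int).toNat = j.toNat := by omega
  rw [h3]

theorem pv_getD_set_ne (fvc : List Int) (a j v : Int) (ha : 0 ≤ a) (hj : 0 ≤ j) (hne : j ≠ a) :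
    PySem.List.pyGetD (PySem.List.pySetD fvc a v) j 0 = PySem.List.pyGetD fvc j 0 := by
  rw [PySem.List.pySetD_of_nonneg fvc v ha, pv_getD_nonneg _ _ hj, pv_getD_nonneg _ _ hj]
  simp [List.getD, List.getElem?_set_ne (by omega : a.toNat ≠ j.toNat)]

theorem pv_getD_mask (q a ps : Int) (fvc : List Int) (j : Int) (hj0 : 0 ≤ j) (hjlen : j < (fvc.length : Int)) :
    PySem.List.pyGetD (pvMask q a ps fvc) j 0
      = if a ≤ j ∧ j < ps ∧ PySem.List.pyGetD fvc j 0 = q then -100 else PySem.List.pyGetD fvc j 0 := by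
  rw [pv_getD_nonneg _ _ hj0, pv_getD_nonneg _ _ hj0]
  have hlt : j.toNat < fvc.length := by omega
  have hcast : ((j.toNat : Nat) : Int) = j := by omega
  simp [pvMask, List.getD, List.getElem?_mapIdx, List.getElem?_eq_getElem hlt, hcast]

theorem pv_mask_of_le (q a ps : Int) (fvc : List Int) (h : ps ≤ a) : pvMask q a ps fvc = fvc := by
  apply List.ext_getElem (by simp [pvMask])
  intro k h1 h2
  simp only [pvMask, List.getElem_mapIdx]
  rw [if_neg (by omega)]

theorem pv_mask_step_match (q a ps : Int) (fvc : List Int) (ha : 0 ≤ a) (hps : a < ps)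
    (hm : PySem.List.pyGetD fvc a 0 = q) :
    pvMask q (a + 1) ps (PySem.List.pySetD fvc a (-100)) = pvMask q a ps fvc := by
  rw [PySem.List.pySetD_of_nonneg fvc (-100) ha]
  apply List.ext_getElem (by simp [pvMask])
  intro k h1 h2
  have hklen : k < fvc.length := by simpa [pvMask] using h2
  simp only [pvMask, List.getElem_mapIdx]
  by_cases hk : k = a.toNat
  · subst hk
    rw [List.getElem_set_self (by simpa [pvMask] using h2)]
    rw [if_neg (by omega), if_pos ?_]
    refine ⟨by omega, by omega, ?_⟩
    rw [pv_getD_nonneg _ _ ha] at hm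
    simpa [List.getD, List.getElem?_eq_getElem (by simpa [pvMask] using h2 : a.toNat < fvc.length)] using hm
  · rw [List.getElem_set_ne (by omega)]
    have hiff : (a + 1 ≤ (k:Int) ∧ (k:Int) < ps ∧ fvc[k] = q) ↔ (a ≤ (k:Int) ∧ (k:Int) < ps ∧ fvc[k] = q) := by
      constructor <;> rintro ⟨x, y, z⟩ <;> exact ⟨by omega, y, z⟩
    rw [if_congr hiff rfl rfl]

theorem pv_mask_step_nomatch (q a ps : Int) (fvc : List Int) (ha : 0 ≤ a)
    (hm : ¬ PySem.List.pyGetD fvc a 0 = q) :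
    pvMask q (a + 1) ps fvc = pvMask q a ps fvc := by
  apply List.ext_getElem (by simp [pvMask])
  intro k h1 h2
  have hklen : k < fvc.length := by simpa [pvMask] using h2
  simp only [pvMask, List.getElem_mapIdx]
  by_cases hk : k = a.toNat
  · subst hk
    rw [if_neg (by omega), if_neg ?_]
    rintro ⟨x, y, z⟩
    apply hm
    rw [pv_getD_nonneg _ _ ha]
    simpa [List.getD, List.getElem?_eq_getElem (by simpa [pvMask] using h2 : a.toNat < fvc.length)] using z
  · have hiff : (a + 1 ≤ (k:Int) ∧ (k:Int) < ps ∧ fvc[k] = q) ↔ (a ≤ (k:Int) ∧ (k:Int) < ps ∧ fvc[k] = q) := by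
      constructor <;> rintro ⟨x, y, z⟩ <;> exact ⟨by omega, y, z⟩
    rw [if_congr hiff rfl rfl]

theorem pv_inner_spec (ps : Int) (pt : List Int) (q : Int) :
    ∀ (n : Nat) (a : Int) (fvc acc : List Int), 0 ≤ a → (ps - a).toNat ≤ n →
    (PySem.List.pyRange a ps 1).foldl
        (fun (st2 : List Int × List Int) j =>
          if q = PySem.List.pyGetD st2.1 j 0 then
            (PySem.List.pySetD st2.1 j (-100), st2.2 ++ [PySem.List.pyGetD pt j 0])
          else st2) (fvc, acc)
      = (pvMask q a ps fvc,
         acc ++ ((PySem.List.pyRange a ps 1).filter (fun j => decide (PySem.List.pyGetD fvc j 0 = q))).map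
                (fun j => PySem.List.pyGetD pt j 0)) := by
  intro n
  induction n with
  | zero =>
    intro a fvc acc ha hn
    rw [PySem.List.pyRange_one_eq_nil (by omega), pv_mask_of_le _ _ _ _ (by omega)]
    simp
  | succ m ih =>
    intro a fvc acc ha hn
    by_cases hlt : a < ps
    · rw [PySem.List.pyRange_one_cons hlt]
      simp only [List.foldl_cons, List.filter_cons]
      by_cases hm : PySem.List.pyGetD fvc a 0 = q
      · rw [if_pos hm.symm]
        rw [ih (a+1) _ _ (by omega) (by omega)]
        rw [pv_mask_step_match q a ps fvc ha hlt hm]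
        have hfc : ∀ j ∈ PySem.List.pyRange (a+1) ps 1,
            decide (PySem.List.pyGetD (PySem.List.pySetD fvc a (-100)) j 0 = q)
              = decide (PySem.List.pyGetD fvc j 0 = q) := by
          intro j hj
          rw [PySem.List.mem_pyRange_one] at hj
          rw [pv_getD_set_ne fvc a j (-100) ha (by omega) (by omega)]
        rw [List.filter_congr hfc]
        simp [hm]
      · rw [if_neg (fun h => hm h.symm)]
        rw [ih (a+1) _ _ (by omega) (by omega)]
        rw [pv_mask_step_nomatch q a ps fvc ha hm]
        simp [hm]
    · rw [PySem.List.pyRange_one_eq_nil (by omega), pv_mask_of_le _ _ _ _ (by omega)]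
      simp

theorem pv_phase1 (fv : List Int) (n : Nat) (v : Int) :
    ((PySem.List.pyRange 0 (n : Int) 1).foldl
        (fun (bk : PySem.Dict Int (List Int)) j =>
          bk.modify (PySem.List.pyGetD fv j 0) [] (· ++ [j]))
        PySem.Dict.empty).getD v []
      = (PySem.List.pyRange 0 (n : Int) 1).filter (fun j => decide (PySem.List.pyGetD fv j 0 = v)) := by
  induction n with
  | zero => simp [PySem.List.pyRange_one_eq_nil (by omega : (0:Int) ≤ 0)]
  | succ m ih =>
    have hcast : ((m + 1 : Nat) : Int) = (m : Int) + 1 := by push_cast; ring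
    rw [hcast, PySem.List.pyRange_one_succ_right (by omega : (0:Int) ≤ (m:Int))]
    simp only [List.foldl_append, List.foldl_cons, List.foldl_nil, List.filter_append]
    rw [PySem.Dict.getD_modify]
    by_cases hveq : v = PySem.List.pyGetD fv (m : Int) 0
    · rw [if_pos hveq, ← hveq, ih, List.filter_cons,
        if_pos (by simp [hveq.symm]), List.filter_nil]
    · rw [if_neg hveq, ih, List.filter_cons,
        if_neg (by simp only [decide_eq_true_eq]; exact fun h => hveq h.symm),
        List.filter_nil, List.append_nil]

theorem pv_stepA_eq (ps : Int) (pt : List Int) (q : Int) (fvc acc : List Int) :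
    pvStepA ps pt (fvc, acc) q
      = (pvMask q 0 ps fvc, acc ++ (pvMatches fvc ps q).map (fun j => PySem.List.pyGetD pt j 0)) := by
  unfold pvStepA pvIdxs pvMatches pvIdxs
  exact pv_inner_spec ps pt q ps.toNat 0 fvc acc (by omega) (by omega)

theorem pv_get?_erase_self {ν : Type} (d : PySem.Dict Int ν) (k : Int) : (d.erase k).get? k = none := by
  simp [PySem.Dict.erase, PySem.Dict.get?, List.find?_eq_none]

theorem pv_get?_erase_of_ne {ν : Type} (d : PySem.Dict Int ν) (k k' : Int) (h : k' ≠ k) :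
    (d.erase k).get? k' = d.get? k' := by
  simp only [PySem.Dict.erase, PySem.Dict.get?]
  congr 1
  induction d.items with
  | nil => rfl
  | cons p t ih =>
    by_cases hp : p.1 = k'
    · rw [List.filter_cons, if_pos (by simpa [hp] using h)]
      simp [List.find?, hp]
    · by_cases hk : p.1 = k
      · rw [List.filter_cons, if_neg (by simp [hk]), List.find?_cons_of_neg (by simp [hp])]
        exact ih
      · rw [List.filter_cons, if_pos (by simp [hk]), List.find?_cons_of_neg (by simp [hp]),
          List.find?_cons_of_neg (by simp [hp])]
        exact ih

theorem pv_getD_erase_self {ν : Type} (d : PySem.Dict Int ν) (k : Int) (d0 : ν) :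
    (d.erase k).getD k d0 = d0 := by
  simp [PySem.Dict.getD, pv_get?_erase_self]

theorem pv_getD_erase_of_ne {ν : Type} (d : PySem.Dict Int ν) (k k' : Int) (d0 : ν) (h : k' ≠ k) :
    (d.erase k).getD k' d0 = d.getD k' d0 := by
  simp [PySem.Dict.getD, pv_get?_erase_of_ne d k k' h]

theorem pv_matches_mask_self (q ps : Int) (fvc : List Int) (hq : q ≠ -100)
    (hlen : ps ≤ (fvc.length : Int)) :
    pvMatches (pvMask q 0 ps fvc) ps q = [] := by
  rw [pvMatches, List.filter_eq_nil_iff]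
  intro j hj
  rw [pvIdxs, PySem.List.mem_pyRange_one] at hj
  rw [decide_eq_true_eq, pv_getD_mask q 0 ps fvc j hj.1 (by omega)]
  split_ifs with h
  · omega
  · intro hc; exact h ⟨hj.1, hj.2, hc⟩

theorem pv_matches_mask_other (q ps v : Int) (fvc : List Int) (hv : v ≠ q)
    (hv2 : v ≠ -100) (hlen : ps ≤ (fvc.length : Int)) :
    pvMatches (pvMask q 0 ps fvc) ps v = pvMatches fvc ps v := by
  rw [pvMatches, pvMatches]
  apply List.filter_congr
  intro j hj
  rw [pvIdxs, PySem.List.mem_pyRange_one] at hj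
  rw [pv_getD_mask q 0 ps fvc j hj.1 (by omega)]
  split_ifs with h
  · simp only [decide_eq_decide]
    constructor
    · intro hx; omega
    · intro hx; rw [hx] at h; exact absurd h.2.2 hv
  · rfl

theorem pv_main (ps : Int) (pt : List Int) (qs : List Int) :
    ∀ (fvc : List Int) (bk : PySem.Dict Int (List Int)) (acc : List Int),
    ps ≤ (fvc.length : Int) →
    (∀ q ∈ qs, q ≠ -100) →
    (∀ v : Int, v ≠ -100 → bk.getD v [] = pvMatches fvc ps v) →
    (qs.foldl (pvStepA ps pt) (fvc, acc)).2 = (qs.foldl (pvStepB pt) (bk, acc)).2 := by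
  induction qs with
  | nil => intro fvc bk acc _ _ _; rfl
  | cons q qs ih =>
    intro fvc bk acc hlen hqs hbk
    have hq : q ≠ -100 := hqs q List.mem_cons_self
    simp only [List.foldl_cons]
    rw [pv_stepA_eq]
    have hb : pvStepB pt (bk, acc) q
        = (bk.erase q, acc ++ (pvMatches fvc ps q).map (fun j => PySem.List.pyGetD pt j 0)) := by
      unfold pvStepB
      rw [hbk q hq]
    rw [hb]
    apply ih
    · rw [pv_length_mask]; exact hlen
    · intro q' hq'; exact hqs q' (List.mem_cons_of_mem _ hq')
    · intro v hv
      by_cases hvq : v = q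
      · subst hvq
        rw [pv_getD_erase_self, pv_matches_mask_self v ps fvc hv hlen]
      · rw [pv_getD_erase_of_ne bk q v [] hvq, hbk v hv,
          pv_matches_mask_other q ps v fvc hvq hv hlen]

theorem pv_portA_eq (sf fv : List Int) (ps : Int) (pt : List Int) :
    sortedPopTable sf fv ps pt
      = (((PySem.List.pyRange 0 ps 1).map (fun i => PySem.List.pyGetD sf i 0)).foldl
          (pvStepA ps pt) (fv, ([] : List Int))).2 := by
  unfold sortedPopTable
  rw [List.foldl_map]
  rfl

theorem pv_portB_eq (sf fv : List Int) (ps : Int) (pt : List Int) :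
    sortedPopTable_alt sf fv ps pt
      = (((PySem.List.pyRange 0 ps 1).map (fun i => PySem.List.pyGetD sf i 0)).foldl
          (pvStepB pt)
          ((PySem.List.pyRange 0 ps 1).foldl
            (fun (bk : PySem.Dict Int (List Int)) j =>
              bk.modify (PySem.List.pyGetD fv j 0) [] (· ++ [j]))
            PySem.Dict.empty, ([] : List Int))).2 := by
  unfold sortedPopTable_alt
  rw [List.foldl_map]
  rfl

theorem pv_queries_ne (sf : List Int) (ps : Int)
    (hlen : ps ≤ (sf.length : Int)) (hsf : (-100 : Int) ∉ sf.take ps.toNat) :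
    ∀ q ∈ (PySem.List.pyRange 0 ps 1).map (fun i => PySem.List.pyGetD sf i 0), q ≠ -100 := by
  intro q hqmem
  rw [List.mem_map] at hqmem
  obtain ⟨i, hi, hqe⟩ := hqmem
  rw [PySem.List.mem_pyRange_one] at hi
  intro hqc
  apply hsf
  rw [← hqc, ← hqe, pv_getD_nonneg sf i hi.1]
  have hlt : i.toNat < sf.length := by omega
  rw [List.getD, List.getElem?_eq_getElem hlt]
  simp only [Option.getD_some]
  exact List.mem_take_iff_getElem.mpr ⟨i.toNat, by omega, rfl⟩

-- ===== VERDICT (by name: the statement is the Claim_ definition above) =====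
theorem sortedPopTable_spec : Claim_equal_sortedPopTable := by
  intro sf fv ps pt hdom hpre
  unfold Spec_sortedPopTable
  obtain ⟨hsf, hfv, hpt, hsent⟩ := hpre
  by_cases hps : 0 ≤ ps
  · have hn : ps = ((ps.toNat : Nat) : Int) := by omega
    rw [pv_portA_eq, pv_portB_eq]
    refine pv_main ps pt _ fv _ [] hfv (pv_queries_ne sf ps hsf hsent) ?_
    intro v hv
    rw [pvMatches, pvIdxs, hn]
    exact pv_phase1 fv ps.toNat v
  · have hnil : PySem.List.pyRange 0 ps 1 = [] := PySem.List.pyRange_one_eq_nil (by omega)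
    simp [sortedPopTable, sortedPopTable_alt, hnil]
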